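-- pv_equiv track=rewrite | github.com/vmaza-dev/Progra_1-Reserva_de_turnos_medicos | crear_leer_turnos.py | devolver_turnos_med
-- ===== SOURCE A (Python) =====
-- def devolver_turnos_med(matriz_turnos, fecha, mat_med, hora_turnos, libres = True):
--     """
--     Devuelve una lista con los horarios libres del médico en un fecha dada.
--
--     Args:
--
--     Returns:
--     """
--     turnos_tomados = []
--     turnos_fecha = filtrar_turnos(matriz_turnos, fecha)
--     for turno in turnos_fecha:
--         if mat_med == turno[5]:
--             turnos_tomados.append(turno[2])
--     turnos_tomados.sort()
--     if libres:
--         turnos_libres = []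
--         for hora_turno in hora_turnos:
--             if hora_turno not in turnos_tomados:
--                 turnos_libres.append(hora_turno)
--             elif hora_turno in turnos_tomados:
--                 turnos_libres.append("No disp.")
--         turnos_libres[0:0] = [mat_med]
--         return turnos_libres
--
--     turnos_tomados[0:0] = [mat_med]
--     return turnos_tomados
--
-- def filtrar_turnos(matriz_turnos, filtro, inverso = False):
--     """
--     Filtra turnos según lo solicitado.
--
--     Si inverso True, filtra lo que no coincide.
--
--     Args:
--         matriz_turnos(list[list]): Matriz de turnos.
--         filtro(str|int|date): Clave de filtrado.
--         inverso(bool): Defecto False.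
--
--     Returns:
--         Matriz de turno filtrada
--     """
--     turnos_filtrados = []
--     if inverso == False:
--         for turno in matriz_turnos:
--             if filtro in turno:
--                 turnos_filtrados.append(turno)
--     elif inverso == True:
--         for turno in matriz_turnos:
--             if filtro not in turno:
--                 turnos_filtrados.append(turno)
--     return turnos_filtrados
-- ===== SOURCE B (Python) =====
-- def devolver_turnos_med(matriz_turnos, fecha, mat_med, hora_turnos, libres=True):
--     """Same result as A by a different decomposition: collect the doctor's taken
--     slots in one comprehension, and for the 'libres' view start from the full
--     slot list and overwrite every occurrence of each taken slot with "No disp."."""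
--     tomados = sorted(t[2] for t in matriz_turnos if fecha in t and t[5] == mat_med)
--     if libres:
--         res = list(hora_turnos)
--         for t in tomados:
--             res = ["No disp." if h == t else h for h in res]
--         return [mat_med] + res
--     return [mat_med] + tomados
-- ===== Notes on version B (the rewrite author's own statement) =====
-- stated objective: alternative
-- what changed: B collects the taken slots in a single comprehension (instead of filter helper + append loop + in-place sort) and builds the free view by starting from the full slot list and overwriting occurrences of each taken slot, instead of testing membership of each slot in the taken list.
import Mathlib
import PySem

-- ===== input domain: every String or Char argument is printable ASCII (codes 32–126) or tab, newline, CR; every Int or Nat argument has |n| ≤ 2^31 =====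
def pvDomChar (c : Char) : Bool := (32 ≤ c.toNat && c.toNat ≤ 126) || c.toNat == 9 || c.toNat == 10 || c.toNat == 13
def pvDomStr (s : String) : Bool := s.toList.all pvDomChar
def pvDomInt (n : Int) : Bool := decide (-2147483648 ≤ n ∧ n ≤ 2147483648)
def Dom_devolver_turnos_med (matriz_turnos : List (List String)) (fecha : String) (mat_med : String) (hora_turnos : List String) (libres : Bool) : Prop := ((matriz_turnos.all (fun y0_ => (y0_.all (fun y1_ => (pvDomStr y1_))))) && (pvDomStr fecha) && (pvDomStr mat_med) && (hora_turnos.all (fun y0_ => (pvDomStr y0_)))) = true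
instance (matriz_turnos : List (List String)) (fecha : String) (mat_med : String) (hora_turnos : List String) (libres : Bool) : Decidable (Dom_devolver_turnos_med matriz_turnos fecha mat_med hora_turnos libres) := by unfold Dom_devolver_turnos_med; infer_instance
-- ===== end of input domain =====

-- B collects the taken slots in one comprehension and builds the free view by overwriting
-- occurrences of each taken slot in the full slot list (objective: alternative decomposition).

-- ===== PORT A =====
-- helper: filtrar_turnos(matriz_turnos, filtro) with inverso = False (the only call made)
def filtrar_turnos (matriz_turnos : List (List String)) (filtro : String) : List (List String) :=
  matriz_turnos.foldl (fun acc turno => if turno.contains filtro then acc ++ [turno] else acc) []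

def devolver_turnos_med (matriz_turnos : List (List String)) (fecha : String) (mat_med : String) (hora_turnos : List String) (libres : Bool) : List String :=
  let turnos_fecha := filtrar_turnos matriz_turnos fecha
  -- turno[5] / turno[2]: in range for every turno on Pre_ (rows containing fecha have length ≥ 6)
  let turnos_tomados := turnos_fecha.foldl (fun acc turno =>
    if mat_med == PySem.List.pyGetD turno 5 "" then acc ++ [PySem.List.pyGetD turno 2 ""] else acc) []
  let turnos_tomados := PySem.List.sorted turnos_tomados (fun x => x) false
  if libres then
    let turnos_libres := hora_turnos.foldl (fun acc hora_turno =>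
      if !(turnos_tomados.contains hora_turno) then acc ++ [hora_turno]
      else if turnos_tomados.contains hora_turno then acc ++ ["No disp."]
      else acc) []
    mat_med :: turnos_libres
  else
    mat_med :: turnos_tomados

-- ===== PORT B =====
def devolver_turnos_med_alt (matriz_turnos : List (List String)) (fecha : String) (mat_med : String) (hora_turnos : List String) (libres : Bool) : List String :=
  let tomados := PySem.List.sorted
    ((matriz_turnos.filter (fun t => t.contains fecha && (PySem.List.pyGetD t 5 "" == mat_med))).map
      (fun t => PySem.List.pyGetD t 2 "")) (fun x => x) false
  if libres then
    mat_med :: tomados.foldl (fun res t => res.map (fun h => if h == t then "No disp." else h)) hora_turnos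
  else
    mat_med :: tomados

-- ===== PRECONDITION & SPEC =====
-- Pre_ excludes exactly the inputs where A raises IndexError: a row that contains fecha but
-- has fewer than 6 entries makes 'turno[5]' raise.
def Pre_devolver_turnos_med (matriz_turnos : List (List String)) (fecha : String) (mat_med : String) (hora_turnos : List String) (libres : Bool) : Prop :=
  ∀ turno ∈ matriz_turnos, fecha ∈ turno → 6 ≤ turno.length
instance (matriz_turnos : List (List String)) (fecha : String) (mat_med : String) (hora_turnos : List String) (libres : Bool) : Decidable (Pre_devolver_turnos_med matriz_turnos fecha mat_med hora_turnos libres) := by unfold Pre_devolver_turnos_med; infer_instance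

def pvWitness_devolver_turnos_med : List (List String) × String × String × List String × Bool :=
  ([["d1", "p", "09:00", "x", "y", "M1"], ["d2", "p", "10:00", "x", "y", "M1"]], "d1", "M1", ["09:00", "10:00"], true)

def Spec_devolver_turnos_med (matriz_turnos : List (List String)) (fecha : String) (mat_med : String) (hora_turnos : List String) (libres : Bool) (out : List String) : Prop := out = devolver_turnos_med_alt matriz_turnos fecha mat_med hora_turnos libres
instance (matriz_turnos : List (List String)) (fecha : String) (mat_med : String) (hora_turnos : List String) (libres : Bool) (out : List String) : Decidable (Spec_devolver_turnos_med matriz_turnos fecha mat_med hora_turnos libres out) := by unfold Spec_devolver_turnos_med; infer_instance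

-- ===== CLAIM (what is proved, stated in full; the proofs are below) =====
def Claim_equal_devolver_turnos_med : Prop := ∀ (matriz_turnos : List (List String)) (fecha : String) (mat_med : String) (hora_turnos : List String) (libres : Bool), Dom_devolver_turnos_med matriz_turnos fecha mat_med hora_turnos libres → Pre_devolver_turnos_med matriz_turnos fecha mat_med hora_turnos libres → Spec_devolver_turnos_med matriz_turnos fecha mat_med hora_turnos libres (devolver_turnos_med matriz_turnos fecha mat_med hora_turnos libres)

-- ===== LEMMAS AND PROOFS =====

-- filtrar_turnos' append loop with a general accumulator
theorem filtrar_aux (f : String) (ys : List (List String)) (acc : List (List String)) :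
    ys.foldl (fun acc t => if t.contains f then acc ++ [t] else acc) acc
      = acc ++ ys.filter (fun t => t.contains f) := by
  induction ys generalizing acc with
  | nil => simp
  | cons y ys ih =>
    rw [List.foldl_cons, List.filter_cons]
    by_cases hy : y.contains f = true
    · rw [if_pos hy, if_pos hy, ih]; simp
    · rw [if_neg hy, if_neg hy, ih]

-- filtrar_turnos is List.filter
theorem filtrar_eq_filter (L : List (List String)) (f : String) :
    filtrar_turnos L f = L.filter (fun t => t.contains f) := by
  unfold filtrar_turnos
  rw [filtrar_aux, List.nil_append]

-- the append-loop over a filtered list is map over an and-filter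
theorem tomados_eq (L : List (List String)) (p q : List String → Bool) (g : List String → String)
    (acc : List String) :
    (L.filter p).foldl (fun acc t => if q t then acc ++ [g t] else acc) acc
      = acc ++ ((L.filter (fun t => p t && q t)).map g) := by
  induction L generalizing acc with
  | nil => simp
  | cons x xs ih =>
    rw [List.filter_cons, List.filter_cons]
    by_cases hp : p x = true
    · rw [if_pos hp]
      by_cases hq : q x = true
      · rw [List.foldl_cons, if_pos hq, if_pos (by simp [hp, hq]), List.map_cons, ih]; simp
      · rw [List.foldl_cons, if_neg hq, if_neg (by simp [hq]), ih]
    · rw [if_neg hp, if_neg (by simp [hp]), ih]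

-- A's libres loop is a map
theorem libres_loop_eq (T H acc : List String) :
    H.foldl (fun acc h =>
      if !(T.contains h) then acc ++ [h]
      else if T.contains h then acc ++ ["No disp."]
      else acc) acc
      = acc ++ H.map (fun h => if T.contains h then "No disp." else h) := by
  induction H generalizing acc with
  | nil => simp
  | cons h hs ih =>
    rw [List.foldl_cons, List.map_cons]
    by_cases hc : T.contains h = true
    · rw [if_neg (by simpa using hc), if_pos hc, if_pos hc, ih]; simp
    · rw [if_pos (by simpa using hc), if_neg hc, ih]; simp

-- once overwritten, an entry stays "No disp."
theorem fold_nodisp (S : List String) :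
    S.foldl (fun x t => if x == t then "No disp." else x) "No disp." = "No disp." := by
  induction S with
  | nil => rfl
  | cons t S ih => rw [List.foldl_cons, ite_self]; exact ih

-- elementwise effect of B's overwrite passes
theorem fold_elem (S : List String) (h : String) :
    S.foldl (fun x t => if x == t then "No disp." else x) h
      = if S.contains h then "No disp." else h := by
  induction S with
  | nil => rfl
  | cons t S ih =>
    rw [List.foldl_cons]
    by_cases he : (h == t) = true
    · have he' : h = t := by simpa using he
      rw [if_pos he, fold_nodisp, if_pos (by simp [List.contains_cons, he'])]
    · have he' : ¬ h = t := fun e => he (by simp [e])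
      rw [if_neg he, ih]
      have htf : (h == t) = false := by simp [he']
      have hteq : (t :: S).contains h = S.contains h := by
        rw [List.contains_cons, htf, Bool.false_or]
      rw [hteq]

-- a fold of map passes is a map of the elementwise fold
theorem fold_map_swap (S L : List String) :
    S.foldl (fun res t => res.map (fun h => if h == t then "No disp." else h)) L
      = L.map (fun h => S.foldl (fun x t => if x == t then "No disp." else x) h) := by
  induction S generalizing L with
  | nil => simp
  | cons t S ih =>
    rw [List.foldl_cons, ih, List.map_map]
    rfl

-- the two programs compute the same taken-slot list
theorem tomados_agree (matriz_turnos : List (List String)) (fecha mat_med : String) :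
    (filtrar_turnos matriz_turnos fecha).foldl (fun acc turno =>
        if mat_med == PySem.List.pyGetD turno 5 "" then acc ++ [PySem.List.pyGetD turno 2 ""] else acc) []
      = (matriz_turnos.filter (fun t => t.contains fecha && (PySem.List.pyGetD t 5 "" == mat_med))).map
          (fun t => PySem.List.pyGetD t 2 "") := by
  rw [filtrar_eq_filter,
    tomados_eq matriz_turnos (fun t => t.contains fecha)
      (fun t => mat_med == PySem.List.pyGetD t 5 "") (fun t => PySem.List.pyGetD t 2 "") [],
    List.nil_append]
  congr 1
  apply List.filter_congr
  intro t _
  simp [Bool.beq_comm]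

-- ===== VERDICT (by name: the statement is the Claim_ definition above) =====
theorem devolver_turnos_med_spec : Claim_equal_devolver_turnos_med := by
  intro matriz_turnos fecha mat_med hora_turnos libres _ _
  unfold Spec_devolver_turnos_med devolver_turnos_med devolver_turnos_med_alt
  simp only [tomados_agree]
  cases libres with
  | false => simp
  | true =>
    rw [if_pos rfl, if_pos rfl, libres_loop_eq, fold_map_swap, List.nil_append]
    simp only [List.cons.injEq, true_and]
    apply List.map_congr_left
    intro h _
    rw [fold_elem]
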